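-- pv_equiv track=rewrite | github.com/CPADelaney/flask_roleplay | logic/conflict_system/dynamic_conflict_template.py | _remove_trailing_commas_safe
-- ===== SOURCE A (Python) =====
-- def _remove_trailing_commas_safe(s: str) -> str:
--     """Strip commas that directly precede } or ] while respecting quoted strings."""
--     out = []
--     in_str = False
--     esc = False
--     i = 0
--     n = len(s)
--
--     while i < n:
--         ch = s[i]
--
--         if in_str:
--             out.append(ch)
--             if esc:
--                 esc = False
--             elif ch == '\\':
--                 esc = True
--             elif ch == '"':
--                 in_str = False
--             i += 1
--             continue
--
--         if ch == '"':
--             in_str = True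
--             out.append(ch)
--             i += 1
--             continue
--
--         if ch == ',':
--             j = i + 1
--             # skip whitespace
--             while j < n and s[j] in ' \t\r\n':
--                 j += 1
--             if j < n and s[j] in ']}':
--                 # skip this comma
--                 i += 1
--                 continue
--
--         out.append(ch)
--         i += 1
--
--     return ''.join(out)
-- ===== SOURCE B (Python) =====
-- # B: split into code gaps and string literals, copy literals verbatim and
-- # strip trailing commas in each gap with a single backward pass (no lookahead).
-- _WS = ' \t\r\n'
--
-- def _strip_gap(gap):
--     kept = []
--     closer_next = False
--     for ch in reversed(gap):
--         if ch in _WS: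
--             kept.append(ch)
--         elif ch == ',' and closer_next:
--             closer_next = False
--         else:
--             kept.append(ch)
--             closer_next = ch in ']}'
--     kept.reverse()
--     return ''.join(kept)
--
-- def _remove_trailing_commas_safe(s: str) -> str:
--     out = []
--     i = 0
--     n = len(s)
--     while i < n:
--         j = i
--         while j < n and s[j] != '"':
--             j += 1
--         out.append(_strip_gap(s[i:j]))
--         if j >= n:
--             break
--         k = j + 1
--         esc = False
--         while k < n:
--             c = s[k]
--             if esc:
--                 esc = False
--             elif c == '\\':
--                 esc = True
--             elif c == '"':
--                 k += 1
--                 break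
--             k += 1
--         out.append(s[j:k])
--         i = k
--     return ''.join(out)
-- ===== Notes on version B (the rewrite author's own statement) =====
-- stated objective: alternative
-- what changed: A is a single forward scan with in-string/escape flags and an inner whitespace-lookahead per comma; B first tokenizes the input into string literals and quote-free code gaps, copies literals verbatim, and strips trailing commas in each gap with a single backward pass that carries a boolean flag recording whether the next significant character to the right is a closing bracket, so no lookahead is needed.
import Mathlib
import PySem

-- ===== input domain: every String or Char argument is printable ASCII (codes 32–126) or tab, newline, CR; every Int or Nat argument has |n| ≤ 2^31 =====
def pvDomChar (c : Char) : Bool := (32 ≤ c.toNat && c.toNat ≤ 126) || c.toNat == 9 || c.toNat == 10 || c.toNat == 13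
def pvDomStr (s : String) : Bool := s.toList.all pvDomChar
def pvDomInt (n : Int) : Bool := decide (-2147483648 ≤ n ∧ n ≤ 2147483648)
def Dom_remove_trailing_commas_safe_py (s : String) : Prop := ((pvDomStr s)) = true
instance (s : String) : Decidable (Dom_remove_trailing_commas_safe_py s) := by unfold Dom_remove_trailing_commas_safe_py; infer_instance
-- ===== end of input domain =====

-- B replaces A's single forward scan with comma lookahead by a tokenizer
-- (string literals vs code gaps) plus a backward per-gap pass (objective: alternative).

def pvIsWs (c : Char) : Bool := c = ' ' || c = '\t' || c = '\r' || c = '\n'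
def pvIsCloser (c : Char) : Bool := c = ']' || c = '}'

-- ===== PORT A =====
-- A's inner `while j < n and s[j] in ' \t\r\n'` lookahead, on the remaining suffix
def closerAfter : List Char → Bool
  | [] => false
  | c :: rest => if pvIsWs c then closerAfter rest else pvIsCloser c

def runA : Bool → Bool → List Char → List Char
  | _, _, [] => []
  | inStr, esc, c :: rest =>
    if inStr then
      if esc then c :: runA inStr false rest
      else if c = '\\' then c :: runA inStr true rest
      else if c = '"' then c :: runA false esc rest
      else c :: runA inStr esc rest
    else if c = '"' then c :: runA true esc rest
    else if c = ',' && closerAfter rest then runA inStr esc rest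
    else c :: runA inStr esc rest

def remove_trailing_commas_safe_py (s : String) : String :=
  String.mk (runA false false s.toList)

-- ===== PORT B =====
-- code gap up to the next quote (or end): (gap, rest starting at '"' if any)
def takeGap : List Char → List Char × List Char
  | [] => ([], [])
  | c :: rest =>
    if c = '"' then ([], c :: rest)
    else ((c :: (takeGap rest).1), (takeGap rest).2)

-- string-literal body after an opening quote, through the closing quote
def takeStr : Bool → List Char → List Char × List Char
  | _, [] => ([], [])
  | esc, c :: rest =>
    if esc then ((c :: (takeStr false rest).1), (takeStr false rest).2)
    else if c = '\\' then ((c :: (takeStr true rest).1), (takeStr true rest).2)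
    else if c = '"' then ([c], rest)
    else ((c :: (takeStr false rest).1), (takeStr false rest).2)

-- backward pass over a gap: state = "next significant char to the right is ] or }"
def stripStep (c : Char) (st : Bool × List Char) : Bool × List Char :=
  if pvIsWs c then (st.1, c :: st.2)
  else if c = ',' && st.1 then (false, st.2)
  else (pvIsCloser c, c :: st.2)

def stripGap (g : List Char) : List Char := (g.foldr stripStep (false, [])).2

theorem takeGap_len : ∀ l : List Char, (takeGap l).2.length ≤ l.length := by
  intro l
  induction l with
  | nil => simp [takeGap]
  | cons c rest ih =>
    simp only [takeGap]
    split
    · simp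
    · simp only [List.length_cons]; omega

theorem takeStr_len : ∀ (l : List Char) (esc : Bool), (takeStr esc l).2.length ≤ l.length := by
  intro l
  induction l with
  | nil => intro esc; simp [takeStr]
  | cons c rest ih =>
    intro esc
    simp only [takeStr]
    split_ifs <;> simp only [List.length_cons] <;> first
      | (exact Nat.le_succ _)
      | (have := ih true; omega)
      | (have := ih false; omega)

def runB (l : List Char) : List Char :=
  stripGap (takeGap l).1 ++
    (match h : (takeGap l).2 with
     | [] => []
     | q :: r' => q :: ((takeStr false r').1 ++ runB (takeStr false r').2))
termination_by l.length
decreasing_by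
  have h1 : ((takeGap l).2).length ≤ l.length := takeGap_len l
  rw [h] at h1
  have h2 := takeStr_len r' false
  simp only [List.length_cons] at h1
  omega

def remove_trailing_commas_safe_py_alt (s : String) : String :=
  String.mk (runB s.toList)

-- ===== PRECONDITION & SPEC =====
def Spec_remove_trailing_commas_safe_py (s : String) (out : String) : Prop := out = remove_trailing_commas_safe_py_alt s
instance (s : String) (out : String) : Decidable (Spec_remove_trailing_commas_safe_py s out) := by unfold Spec_remove_trailing_commas_safe_py; infer_instance

-- ===== CLAIM (what is proved, stated in full; the proofs are below) =====
def Claim_equal_remove_trailing_commas_safe_py : Prop := ∀ (s : String), Dom_remove_trailing_commas_safe_py s → Spec_remove_trailing_commas_safe_py s (remove_trailing_commas_safe_py s)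

-- ===== LEMMAS AND PROOFS =====

-- A's forward processing of a quote-free gap
def fwdStrip : List Char → List Char
  | [] => []
  | c :: r => if c = ',' && closerAfter r then fwdStrip r else c :: fwdStrip r

lemma ws_ne_comma {c : Char} (h : pvIsWs c = true) : c ≠ ',' := by
  intro e; subst e; exact absurd h (by decide)

lemma foldr_stripStep (g : List Char) :
    g.foldr stripStep (false, []) = (closerAfter g, fwdStrip g) := by
  induction g with
  | nil => simp [closerAfter, fwdStrip]
  | cons c g ih =>
    rw [List.foldr_cons, ih]
    by_cases hw : pvIsWs c = true
    · have hc := ws_ne_comma hw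
      simp [stripStep, closerAfter, fwdStrip, hw, hc]
    · by_cases hc : c = ','
      · subst hc
        by_cases ha : closerAfter g = true
        · simp [stripStep, closerAfter, fwdStrip, hw, ha, pvIsCloser]
        · simp [stripStep, closerAfter, fwdStrip, hw, ha, pvIsCloser]
      · simp [stripStep, closerAfter, fwdStrip, hw, hc]

lemma closerAfter_append (g rest : List Char) (hr : closerAfter rest = false) :
    closerAfter (g ++ rest) = closerAfter g := by
  induction g with
  | nil => simpa [closerAfter] using hr
  | cons c g ih =>
    by_cases hw : pvIsWs c = true <;> simp [closerAfter, hw, ih]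

lemma runA_gap (g rest : List Char) (hg : ∀ c ∈ g, c ≠ '"')
    (hr : closerAfter rest = false) :
    runA false false (g ++ rest) = fwdStrip g ++ runA false false rest := by
  induction g with
  | nil => simp [fwdStrip]
  | cons c g ih =>
    have hcq : c ≠ '"' := hg c (by simp)
    have ih' := ih (fun x hx => hg x (by simp [hx]))
    rw [List.cons_append]
    by_cases hc : (c = ',' && closerAfter (g ++ rest)) = true
    · have hc' : (c = ',' && closerAfter g) = true := by
        rwa [closerAfter_append g rest hr] at hc
      simp [runA, fwdStrip, hcq, hc, hc', ih']
    · have hc' : ¬ (c = ',' && closerAfter g) = true := by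
        rwa [closerAfter_append g rest hr] at hc
      simp [runA, fwdStrip, hcq, hc, hc', ih']

lemma runA_str (l : List Char) (esc : Bool) :
    runA true esc l = (takeStr esc l).1 ++ runA false false (takeStr esc l).2 := by
  induction l generalizing esc with
  | nil => simp [runA, takeStr]
  | cons c rest ih =>
    cases esc with
    | true => simp [runA, takeStr, ih false]
    | false =>
      by_cases hb : c = '\\'
      · simp [runA, takeStr, hb, ih true]
      · by_cases hq : c = '"'
        · simp [runA, takeStr, hb, hq]
        · simp [runA, takeStr, hb, hq, ih false]

lemma takeGap_append : ∀ l : List Char, (takeGap l).1 ++ (takeGap l).2 = l := by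
  intro l
  induction l with
  | nil => simp [takeGap]
  | cons c rest ih => by_cases h : c = '"' <;> simp [takeGap, h, ih]

lemma takeGap_noquote : ∀ (l : List Char), ∀ c ∈ (takeGap l).1, c ≠ '"' := by
  intro l
  induction l with
  | nil => simp [takeGap]
  | cons c rest ih =>
    by_cases h : c = '"'
    · simp [takeGap, h]
    · intro x hx
      simp only [takeGap, if_neg h] at hx
      rcases List.mem_cons.mp hx with h1 | h1
      · subst h1; exact h
      · exact ih x h1

lemma takeGap_rest : ∀ l : List Char, (takeGap l).2 = [] ∨ ∃ r', (takeGap l).2 = '"' :: r' := by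
  intro l
  induction l with
  | nil => left; simp [takeGap]
  | cons c rest ih =>
    by_cases h : c = '"'
    · right; exact ⟨rest, by simp [takeGap, h]⟩
    · simpa [takeGap, h] using ih

lemma closerAfter_rest (l : List Char) : closerAfter (takeGap l).2 = false := by
  rcases takeGap_rest l with h | ⟨r', h⟩ <;> rw [h]
  · rfl
  · simp [closerAfter, pvIsWs, pvIsCloser]

lemma runA_eq_runB : ∀ (n : ℕ) (l : List Char), l.length ≤ n → runA false false l = runB l := by
  intro n
  induction n with
  | zero =>
    intro l hl
    have : l = [] := List.eq_nil_of_length_eq_zero (Nat.le_zero.mp hl)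
    subst this
    simp [runA, runB, takeGap, stripGap]
  | succ n ih =>
    intro l hl
    have hsplit := takeGap_append l
    have hA : runA false false l = fwdStrip (takeGap l).1 ++ runA false false (takeGap l).2 := by
      conv_lhs => rw [← hsplit]
      exact runA_gap _ _ (takeGap_noquote l) (closerAfter_rest l)
    have hB : stripGap (takeGap l).1 = fwdStrip (takeGap l).1 := by
      unfold stripGap; rw [foldr_stripStep]
    rw [runB.eq_def, hA, hB]
    rcases takeGap_rest l with h | ⟨r', h⟩
    · rw [h]; simp [runA]
    · rw [h]
      have hlen : r'.length < l.length := by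
        have := takeGap_len l
        rw [h] at this
        simp only [List.length_cons] at this
        omega
      have hlen2 : (takeStr false r').2.length ≤ n := by
        have := takeStr_len r' false
        omega
      have hstr : runA false false ('"' :: r') =
          '"' :: ((takeStr false r').1 ++ runA false false (takeStr false r').2) := by
        simp [runA, runA_str r' false]
      rw [hstr, ih _ hlen2]

-- ===== VERDICT (by name: the statement is the Claim_ definition above) =====
theorem remove_trailing_commas_safe_py_spec : Claim_equal_remove_trailing_commas_safe_py := by
  intro s _
  unfold Spec_remove_trailing_commas_safe_py remove_trailing_commas_safe_py remove_trailing_commas_safe_py_alt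
  exact congrArg String.mk (runA_eq_runB s.toList.length s.toList le_rfl)
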